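-- pv_equiv track=rewrite | github.com/dowoonlee/TIL | baekjun/by_level/platinum/1442.py | isfancy
-- ===== SOURCE A (Python) =====
-- def isfancy(x):## fancy or not
--     count = [1,1]
--     num = bin(x)[3:]
--     ans = False
--     for i in num:
--         if int(i)==count[0]:
--             count[1]+=1
--         else:
--             count[0] = int(i)
--             count[1] = 1
--         if count[1]>=3:
--             ans = True
--     return ans
-- ===== SOURCE B (Python) =====
-- def isfancy(x):
--     s = '1' + bin(x)[3:]
--     return '111' in s or '000' in s
-- ===== Notes on version B (the rewrite author's own statement) =====
-- stated objective: simpler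
-- what changed: Replaces A's manual (value, run-length) counter state machine with building the string '1'+bin(x)[3:] and a plain substring test for '111' or '000'.
import Mathlib
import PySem

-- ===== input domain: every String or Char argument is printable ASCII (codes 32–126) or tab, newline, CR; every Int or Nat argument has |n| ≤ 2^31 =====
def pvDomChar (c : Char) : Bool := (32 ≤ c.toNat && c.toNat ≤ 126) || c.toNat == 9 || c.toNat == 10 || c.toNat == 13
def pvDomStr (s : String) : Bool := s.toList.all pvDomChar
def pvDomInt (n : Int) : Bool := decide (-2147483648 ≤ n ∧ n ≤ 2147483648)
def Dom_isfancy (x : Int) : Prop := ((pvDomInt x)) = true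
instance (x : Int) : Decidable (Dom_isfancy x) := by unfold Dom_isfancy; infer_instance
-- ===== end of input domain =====

-- B replaces A's manual (value, run-length) counter loop with a substring test
-- for '111'/'000' on '1' + bin(x)[3:]; simpler, same cost.

-- shared helper: the digits of Python's bin(n) for n ≥ 0 (MSB first, no leading zeros; [] for 0)
def binDigits (n : Nat) : List Char :=
  if hz : n = 0 then [] else binDigits (n / 2) ++ [if n % 2 = 1 then '1' else '0']
termination_by n
decreasing_by exact Nat.div_lt_self (Nat.pos_of_ne_zero hz) (by norm_num)

-- bin(x)[3:]: for x>0 drops '0b' and the leading digit; for x<0 drops '-0b'; '' for 0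
def pyBin3 (x : Int) : List Char :=
  if x > 0 then (binDigits x.toNat).tail
  else if x < 0 then binDigits (-x).toNat
  else []

-- ===== PORT A =====
-- one loop iteration of A: i is a digit char, int(i) = code - 48 (exact on digit chars)
def pvStepA (st : Int × Int × Bool) (i : Char) : Int × Int × Bool :=
  let v : Int := (i.toNat : Int) - 48
  let c0 : Int := if v = st.1 then st.1 else v
  let c1 : Int := if v = st.1 then st.2.1 + 1 else 1
  (c0, c1, st.2.2 || decide (c1 ≥ 3))

def isfancy (x : Int) : Bool :=
  (List.foldl pvStepA (1, 1, false) (pyBin3 x)).2.2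

-- ===== PORT B =====
def pvIsPrefix : List Char → List Char → Bool
  | [], _ => true
  | _ :: _, [] => false
  | a :: p, b :: s => a == b && pvIsPrefix p s

-- Python 'p in s' substring test, as the obvious scan over start positions
def pvContains (p : List Char) : List Char → Bool
  | [] => pvIsPrefix p []
  | a :: t => pvIsPrefix p (a :: t) || pvContains p t

def isfancy_alt (x : Int) : Bool :=
  let s : List Char := '1' :: pyBin3 x
  pvContains ['1', '1', '1'] s || pvContains ['0', '0', '0'] s

-- ===== PRECONDITION & SPEC =====
def Spec_isfancy (x : Int) (out : Bool) : Prop := out = isfancy_alt x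
instance (x : Int) (out : Bool) : Decidable (Spec_isfancy x out) := by unfold Spec_isfancy; infer_instance

-- ===== CLAIM (what is proved, stated in full; the proofs are below) =====
def Claim_equal_isfancy : Prop := ∀ (x : Int), Dom_isfancy x → Spec_isfancy x (isfancy x)

-- ===== LEMMAS AND PROOFS =====

def IsBit (c : Char) : Prop := c = '0' ∨ c = '1'

def hasTriple : List Char → Bool
  | a :: b :: c :: t => (a == b && b == c) || hasTriple (b :: c :: t)
  | _ => false

theorem binDigits_bits (n : Nat) : ∀ c ∈ binDigits n, IsBit c := by
  induction n using binDigits.induct with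
  | case1 => intro c hc; simp [binDigits] at hc
  | case2 n h ih =>
    intro c hc
    rw [binDigits, dif_neg h] at hc
    rcases List.mem_append.mp hc with h1 | h2
    · exact ih c h1
    · simp at h2; split at h2 <;> simp [h2, IsBit]

theorem pyBin3_bits (x : Int) : ∀ c ∈ pyBin3 x, IsBit c := by
  intro c hc
  unfold pyBin3 at hc
  split at hc
  · exact binDigits_bits _ c (List.mem_of_mem_tail hc)
  · split at hc
    · exact binDigits_bits _ c hc
    · simp at hc

theorem hasTriple_cons_ne {a c : Char} (l : List Char) (h : a ≠ c) :
    hasTriple (c :: a :: l) = hasTriple (a :: l) := by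
  cases l with
  | nil => simp [hasTriple]
  | cons b t =>
    have : (c == a) = false := by simp [Ne.symm h]
    simp [hasTriple, this]

theorem foldl_true (l : List Char) : ∀ c0 c1,
    (List.foldl pvStepA (c0, c1, true) l).2.2 = true := by
  induction l with
  | nil => intro c0 c1; simp
  | cons a t ih =>
    intro c0 c1
    simp only [List.foldl_cons, pvStepA]
    split <;> exact ih _ _

-- value stored by A for a bit char
theorem digitVal_eq_iff {a c : Char} (ha : IsBit a) (hc : IsBit c) :
    ((a.toNat : Int) - 48 = (c.toNat : Int) - 48) ↔ a = c := by
  rcases ha with h1 | h1 <;> rcases hc with h2 | h2 <;> subst h1 <;> subst h2 <;> decide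

theorem machine_eq_hasTriple (l : List Char) (hl : ∀ c ∈ l, IsBit c) :
    ∀ (c : Char), IsBit c → ∀ (ans : Bool),
      ((List.foldl pvStepA (((c.toNat : Int) - 48), 1, ans) l).2.2
          = (ans || hasTriple (c :: l)))
      ∧ ((List.foldl pvStepA (((c.toNat : Int) - 48), 2, ans) l).2.2
          = (ans || hasTriple (c :: c :: l))) := by
  induction l with
  | nil => intro c _ ans; simp [hasTriple]
  | cons a t ih =>
    intro c hc ans
    have ha : IsBit a := hl a (List.mem_cons_self ..)
    have ht : ∀ c ∈ t, IsBit c := fun c h => hl c (List.mem_cons_of_mem _ h)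
    by_cases hac : a = c
    · subst hac
      constructor
      · -- run length 1 → 2
        simp only [List.foldl_cons, pvStepA]
        norm_num
        exact (ih ht a ha ans).2
      · -- run length 2 → 3, ans becomes true
        simp only [List.foldl_cons, pvStepA]
        norm_num
        rw [foldl_true]
        simp [hasTriple]
    · have hne : ¬ ((a.toNat : Int) - 48 = (c.toNat : Int) - 48) :=
        fun h => hac ((digitVal_eq_iff ha hc).mp h)
      constructor
      · simp only [List.foldl_cons, pvStepA, if_neg hne]
        have : (ans || decide ((1 : Int) ≥ 3)) = ans := by simp
        rw [this, (ih ht a ha ans).1, hasTriple_cons_ne _ hac]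
      · simp only [List.foldl_cons, pvStepA, if_neg hne]
        have : (ans || decide ((1 : Int) ≥ 3)) = ans := by simp
        rw [this, (ih ht a ha ans).1]
        have h2 : hasTriple (c :: c :: a :: t) = hasTriple (c :: a :: t) := by
          have : (c == a) = false := by simp; exact fun h => hac h.symm
          simp [hasTriple, this]
        rw [h2, hasTriple_cons_ne _ hac]

theorem pvContains_cons (p : List Char) (a : Char) (t : List Char) :
    pvContains p (a :: t) = (pvIsPrefix p (a :: t) || pvContains p t) := rfl

theorem hasTriple_cons3 (a b c : Char) (t : List Char) :
    hasTriple (a :: b :: c :: t) = ((a == b && b == c) || hasTriple (b :: c :: t)) := rfl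

theorem contains_eq_hasTriple (s : List Char) (hs : ∀ c ∈ s, IsBit c) :
    (pvContains ['1', '1', '1'] s || pvContains ['0', '0', '0'] s) = hasTriple s := by
  induction s with
  | nil => simp [pvContains, pvIsPrefix, hasTriple]
  | cons a t ih =>
    have ha : IsBit a := hs a (List.mem_cons_self ..)
    have ht : ∀ c ∈ t, IsBit c := fun c h => hs c (List.mem_cons_of_mem _ h)
    have ih' := ih ht
    match t with
    | [] =>
      rcases ha with h | h <;> subst h <;> decide
    | [b] =>
      have hb : IsBit b := ht b (List.mem_cons_self ..)
      rcases ha with h | h <;> rcases hb with h' | h' <;> subst h <;> subst h' <;> decide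
    | b :: c :: u =>
      have hb : IsBit b := ht b (List.mem_cons_self ..)
      have hcc : IsBit c := ht c (List.mem_cons_of_mem _ (List.mem_cons_self ..))
      rw [pvContains_cons ['1', '1', '1'] a, pvContains_cons ['0', '0', '0'] a,
        hasTriple_cons3, ← ih']
      rcases ha with h | h <;> rcases hb with h' | h' <;> rcases hcc with h'' | h'' <;>
        subst h <;> subst h' <;> subst h'' <;>
        simp only [pvIsPrefix, beq_self_eq_true,
          (show (('1' : Char) == '0') = false from rfl), (show (('0' : Char) == '1') = false from rfl),
          Bool.and_self, Bool.true_and, Bool.false_and, Bool.and_false, Bool.and_true,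
          Bool.false_or, Bool.or_false, Bool.true_or, Bool.or_true]

-- ===== VERDICT (by name: the statement is the Claim_ definition above) =====
theorem isfancy_spec : Claim_equal_isfancy := by
  intro x _
  show isfancy x = isfancy_alt x
  have hbits : ∀ c ∈ pyBin3 x, IsBit c := pyBin3_bits x
  have h1 : ((('1' : Char).toNat : Int) - 48) = 1 := by decide
  have := (machine_eq_hasTriple (pyBin3 x) hbits '1' (Or.inr rfl) false).1
  rw [h1] at this
  unfold isfancy isfancy_alt
  rw [this, contains_eq_hasTriple]
  · simp
  · intro c hc
    rcases List.mem_cons.mp hc with h | h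
    · exact Or.inr h
    · exact hbits c h
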